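-- pv_equiv track=rewrite | github.com/Pandora-jk/opencontacts-map-graph | tools/infra_audit_common.py | unexpected_external_listeners
-- ===== SOURCE A (Python) =====
-- EXPECTED_EXTERNAL_PORTS = {'tcp': {22}, 'udp': {68}}
--
-- LOCAL_LISTENER_PREFIXES = (
--     '127.',
--     'localhost:',
--     '127.0.0.53:',
--     '127.0.0.54:',
--     '[::1]',
--     '[::ffff:127.',
-- )
--
-- def is_local_listener(address: str) -> bool:
--     return any(address.startswith(prefix) for prefix in LOCAL_LISTENER_PREFIXES)
--
-- def classify_external_ports(port_lines: str) -> tuple[list[str], int]: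
--     external: set[str] = set()
--     local_only_count = 0
--     for raw in port_lines.splitlines():
--         parts = raw.split()
--         if len(parts) != 2:
--             continue
--         proto, address = parts
--         if is_local_listener(address):
--             local_only_count += 1
--             continue
--         if ':' not in address:
--             external.add(f'{proto.lower()}/{address}')
--             continue
--         port = address.rsplit(':', 1)[-1]
--         if port.isdigit():
--             external.add(f'{proto.lower()}/{port}')
--         else:
--             external.add(f'{proto.lower()}/{address}')
--     return sorted(external), local_only_count
--
-- def unexpected_external_listeners(
--     port_lines: str,
--     expected_external_ports: dict[str, set[int]] | None = None,
-- ) -> list[str]: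
--     external, _ = classify_external_ports(port_lines)
--     expected = expected_external_ports or EXPECTED_EXTERNAL_PORTS
--     unexpected: list[str] = []
--     for entry in sorted(external):
--         proto, value = entry.split('/', 1)
--         if value.isdigit() and int(value) in expected.get(proto, set()):
--             continue
--         unexpected.append(entry)
--     return unexpected
-- ===== SOURCE B (Python) =====
-- EXPECTED_EXTERNAL_PORTS = {'tcp': {22}, 'udp': {68}}
--
-- LOCAL_LISTENER_PREFIXES = (
--     '127.',
--     'localhost:',
--     '127.0.0.53:',
--     '127.0.0.54:',
--     '[::1]',
--     '[::ffff:127.',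
-- )
--
-- def is_local_listener(address: str) -> bool:
--     return any(address.startswith(prefix) for prefix in LOCAL_LISTENER_PREFIXES)
--
-- def unexpected_external_listeners(
--     port_lines: str,
--     expected_external_ports: dict[str, set[int]] | None = None,
-- ) -> list[str]:
--     expected = expected_external_ports or EXPECTED_EXTERNAL_PORTS
--     result: set[str] = set()
--     for raw in port_lines.splitlines():
--         parts = raw.split()
--         if len(parts) != 2:
--             continue
--         proto, address = parts
--         if is_local_listener(address):
--             continue
--         if ':' not in address:
--             entry = f'{proto.lower()}/{address}'
--         else:
--             port = address.rsplit(':', 1)[-1]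
--             entry = f'{proto.lower()}/{port}' if port.isdigit() else f'{proto.lower()}/{address}'
--         head, value = entry.split('/', 1)
--         if value.isdigit() and int(value) in expected.get(head, set()):
--             continue
--         result.add(entry)
--     return sorted(result)
-- ===== Notes on version B (the rewrite author's own statement) =====
-- stated objective: simpler
-- what changed: B fuses A's two phases into a single pass: each line is parsed and its entry tested for unexpectedness immediately, collecting only unexpected entries in a set that is sorted once at the end, eliminating A's intermediate sorted external list and its second filter loop.
import Mathlib
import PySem

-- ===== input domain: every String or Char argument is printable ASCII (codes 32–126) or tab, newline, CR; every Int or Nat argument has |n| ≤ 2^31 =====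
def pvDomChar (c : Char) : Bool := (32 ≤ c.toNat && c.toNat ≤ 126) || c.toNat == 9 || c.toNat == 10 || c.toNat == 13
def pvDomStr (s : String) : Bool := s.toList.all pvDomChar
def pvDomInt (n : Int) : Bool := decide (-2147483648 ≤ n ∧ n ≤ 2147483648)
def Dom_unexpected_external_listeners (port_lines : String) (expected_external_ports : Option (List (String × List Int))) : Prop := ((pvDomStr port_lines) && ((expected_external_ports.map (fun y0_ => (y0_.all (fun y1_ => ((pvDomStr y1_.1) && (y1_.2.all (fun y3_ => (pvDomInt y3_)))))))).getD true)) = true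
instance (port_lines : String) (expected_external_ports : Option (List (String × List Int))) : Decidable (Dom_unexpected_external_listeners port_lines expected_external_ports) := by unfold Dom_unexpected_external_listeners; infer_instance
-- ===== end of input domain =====

-- B fuses A's two phases (build sorted external list, then filter it) into one pass that
-- tests unexpectedness per line and sorts the resulting set once; objective: simpler.

-- ===== PORT A =====
def EXPECTED_EXTERNAL_PORTS : List (String × List Int) := [("tcp", [22]), ("udp", [68])]

def LOCAL_LISTENER_PREFIXES : List String :=
  ["127.", "localhost:", "127.0.0.53:", "127.0.0.54:", "[::1]", "[::ffff:127."]

def is_local_listener (address : String) : Bool :=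
  LOCAL_LISTENER_PREFIXES.any (fun prefix_ => PySem.Str.startswith address prefix_)

-- address.rsplit(':', 1)[-1]: the part after the LAST ':' (the whole string when no ':').
-- Ported by hand (PySem has no rsplit); exact: takeWhile (≠ ':') on the reversed characters.
def rsplitColonLast (address : String) : String :=
  String.ofList ((address.toList.reverse.takeWhile (fun c => c ≠ ':')).reverse)

-- f'{proto.lower()}/{x}'
def mkEntry (proto x : String) : String :=
  PySem.Str.join "" [PySem.Str.lower proto, "/", x]

-- the body of classify_external_ports' loop; state = (external set, local_only_count)
def classifyStep (st : PySem.Set String × Int) (raw : String) : PySem.Set String × Int :=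
  match PySem.Str.split₀ raw with
  | [proto, address] =>
    if is_local_listener address then (st.1, st.2 + 1)
    else if ¬ PySem.Str.isIn ":" address then (PySem.Set.add st.1 (mkEntry proto address), st.2)
    else
      let port := rsplitColonLast address
      if PySem.Str.strIsdigit port then (PySem.Set.add st.1 (mkEntry proto port), st.2)
      else (PySem.Set.add st.1 (mkEntry proto address), st.2)
  | _ => st  -- len(parts) != 2: continue

def classify_external_ports (port_lines : String) : List String × Int :=
  let st := (PySem.Str.splitlines port_lines).foldl classifyStep (PySem.Set.empty, 0)
  (PySem.List.sorted st.1 (fun x => x) false, st.2)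

-- expected_external_ports or EXPECTED_EXTERNAL_PORTS  (None and {} are falsy)
def expectedOrDefault (expected_external_ports : Option (List (String × List Int))) : List (String × List Int) :=
  match expected_external_ports with
  | none => EXPECTED_EXTERNAL_PORTS
  | some d => if d.isEmpty then EXPECTED_EXTERNAL_PORTS else d

-- proto, value = entry.split('/', 1); True iff the entry is appended to `unexpected`
-- (entries produced by classify_external_ports always contain '/', so the catch-all is unreachable)
def isUnexpected (expected : List (String × List Int)) (entry : String) : Bool :=
  match (PySem.Str.splitMax? entry "/" 1).getD [] with
  | [proto, value] =>
      ¬ (PySem.Str.strIsdigit value &&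
         (PySem.Dict.getD (PySem.Dict.mk expected) proto []).contains ((PySem.Int.ofStr? value).getD 0))
  | _ => true

def unexpected_external_listeners (port_lines : String) (expected_external_ports : Option (List (String × List Int))) : List String :=
  let external := (classify_external_ports port_lines).1
  let expected := expectedOrDefault expected_external_ports
  (PySem.List.sorted external (fun x => x) false).foldl
    (fun unexpected entry => if isUnexpected expected entry then unexpected ++ [entry] else unexpected) []

-- ===== PORT B =====
-- one pass: parse the line, build the entry, keep it (in a set) only if it is unexpected
def altStep (expected : List (String × List Int)) (result : PySem.Set String) (raw : String) : PySem.Set String :=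
  match PySem.Str.split₀ raw with
  | [proto, address] =>
    if is_local_listener address then result
    else
      let entry :=
        if ¬ PySem.Str.isIn ":" address then mkEntry proto address
        else
          let port := rsplitColonLast address
          if PySem.Str.strIsdigit port then mkEntry proto port else mkEntry proto address
      if isUnexpected expected entry then PySem.Set.add result entry else result
  | _ => result

def unexpected_external_listeners_alt (port_lines : String) (expected_external_ports : Option (List (String × List Int))) : List String :=
  let expected := expectedOrDefault expected_external_ports
  PySem.List.sorted ((PySem.Str.splitlines port_lines).foldl (altStep expected) PySem.Set.empty) (fun x => x) false

-- ===== PRECONDITION & SPEC =====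
def Spec_unexpected_external_listeners (port_lines : String) (expected_external_ports : Option (List (String × List Int))) (out : List String) : Prop := out = unexpected_external_listeners_alt port_lines expected_external_ports
instance (port_lines : String) (expected_external_ports : Option (List (String × List Int))) (out : List String) : Decidable (Spec_unexpected_external_listeners port_lines expected_external_ports out) := by unfold Spec_unexpected_external_listeners; infer_instance

-- ===== CLAIM (what is proved, stated in full; the proofs are below) =====
def Claim_equal_unexpected_external_listeners : Prop := ∀ (port_lines : String) (expected_external_ports : Option (List (String × List Int))), Dom_unexpected_external_listeners port_lines expected_external_ports → Spec_unexpected_external_listeners port_lines expected_external_ports (unexpected_external_listeners port_lines expected_external_ports)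

-- ===== LEMMAS AND PROOFS =====

-- filtering commutes with Set.add
theorem filter_set_add (s : List String) (x : String) (p : String → Bool) :
    (PySem.Set.add s x).filter p = if p x then PySem.Set.add (s.filter p) x else s.filter p := by
  by_cases hmem : x ∈ s
  · rw [PySem.Set.add_of_mem hmem]
    by_cases hp : p x = true
    · have : x ∈ s.filter p := List.mem_filter.mpr ⟨hmem, hp⟩
      rw [if_pos hp, PySem.Set.add_of_mem this]
    · simp [hp]
  · rw [PySem.Set.add_of_not_mem hmem, List.filter_append]
    by_cases hp : p x = true
    · have : x ∉ s.filter p := fun h => hmem (List.mem_filter.mp h).1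
      rw [if_pos hp, PySem.Set.add_of_not_mem this]
      simp [hp]
    · simp [hp]

-- B's fold state is the p-filtered version of A's external set
theorem fold_invariant (expected : List (String × List Int)) (lines : List String)
    (s : PySem.Set String) (n : Int) :
    lines.foldl (altStep expected) (s.filter (isUnexpected expected)) =
      ((lines.foldl classifyStep (s, n)).1).filter (isUnexpected expected) := by
  induction lines generalizing s n with
  | nil => rfl
  | cons raw rest ih =>
    simp only [List.foldl_cons]
    have hstep : altStep expected (s.filter (isUnexpected expected)) raw =
        (classifyStep (s, n) raw).1.filter (isUnexpected expected) := by
      unfold altStep classifyStep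
      cases hparts : PySem.Str.split₀ raw with
      | nil => rfl
      | cons a t =>
        cases t with
        | nil => rfl
        | cons b t2 =>
          cases t2 with
          | nil =>
            simp only []
            by_cases hloc : is_local_listener b = true
            · simp [hloc]
            · simp only [hloc, Bool.false_eq_true, ite_false]
              by_cases hcol : PySem.Str.isIn ":" b = true
              · simp only [hcol, not_true]
                by_cases hdig : PySem.Str.strIsdigit (rsplitColonLast b) = true
                · simp only [PySem.Str.strIsdigit_eq] at hdig
                  simp [hdig, filter_set_add]
                · simp only [PySem.Str.strIsdigit_eq, Bool.not_eq_true] at hdig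
                  simp [hdig, filter_set_add]
              · simp only [PySem.Str.isIn_eq, Bool.not_eq_true] at hcol
                simp [show PySem.Chars.isIn [':'] b.toList = false from hcol, filter_set_add]
          | cons _ _ => rfl
    rw [hstep]
    rw [show classifyStep (s, n) raw = ((classifyStep (s, n) raw).1, (classifyStep (s, n) raw).2) from rfl] at *
    exact ih _ _

-- A's external set is duplicate-free
theorem nodup_classify (lines : List String) (s : PySem.Set String) (n : Int) (hs : s.Nodup) :
    ((lines.foldl classifyStep (s, n)).1).Nodup := by
  induction lines generalizing s n with
  | nil => exact hs
  | cons raw rest ih =>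
    simp only [List.foldl_cons]
    have h1 : (classifyStep (s, n) raw).1.Nodup := by
      unfold classifyStep
      cases PySem.Str.split₀ raw with
      | nil => exact hs
      | cons a t =>
        cases t with
        | nil => exact hs
        | cons b t2 =>
          cases t2 with
          | nil =>
            simp only []
            split_ifs <;> first | exact hs | exact PySem.Set.nodup_add _ _ hs
          | cons _ _ => exact hs
    rw [show classifyStep (s, n) raw = ((classifyStep (s, n) raw).1, (classifyStep (s, n) raw).2) from rfl]
    exact ih _ _ h1

-- sorting after filtering = filtering after sorting, on a duplicate-free list
theorem sorted_filter_comm (p : String → Bool) (xs : List String) (hnd : xs.Nodup) :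
    PySem.List.sorted (xs.filter p) (fun x => x) false =
      (PySem.List.sorted xs (fun x => x) false).filter p := by
  apply PySem.List.sorted_eq_of_perm_of_pairwise_lt
  · exact ((PySem.List.sorted_perm xs (fun x => x) false).filter p)
  · have hle : (PySem.List.sorted xs (fun x => x) false).Pairwise (fun a b => a ≤ b) :=
      PySem.List.sorted_pairwise xs (fun x => x)
    have hnd2 : (PySem.List.sorted xs (fun x => x) false).Nodup :=
      (PySem.List.sorted_perm xs (fun x => x) false).nodup_iff.mpr hnd
    have hlt : (PySem.List.sorted xs (fun x => x) false).Pairwise (fun a b => a < b) :=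
      (hle.and hnd2).imp (fun h => lt_of_le_of_ne h.1 h.2)
    exact hlt.sublist List.filter_sublist

-- ===== VERDICT (by name: the statement is the Claim_ definition above) =====
theorem unexpected_external_listeners_spec : Claim_equal_unexpected_external_listeners := by
  intro port_lines expected_external_ports _
  unfold Spec_unexpected_external_listeners
  unfold unexpected_external_listeners unexpected_external_listeners_alt classify_external_ports
  simp only []
  set expected := expectedOrDefault expected_external_ports
  set lines := PySem.Str.splitlines port_lines
  set ext := (lines.foldl classifyStep (PySem.Set.empty, 0)).1 with hext
  have hB : lines.foldl (altStep expected) PySem.Set.empty = ext.filter (isUnexpected expected) := by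
    have := fold_invariant expected lines PySem.Set.empty 0
    simpa using this
  have hnd : ext.Nodup := nodup_classify lines PySem.Set.empty 0 List.nodup_nil
  rw [PySem.List.foldl_append_if, hB, sorted_filter_comm _ _ hnd,
      PySem.List.sorted_sorted]
  simp
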